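-- pv_equiv track=rewrite | github.com/oceanusXXD/code2skill | src/code2skill/impact.py | expand_affected_files
-- ===== SOURCE A (Python) =====
-- from collections import defaultdict, deque
--
-- def expand_affected_files(
--
--     changed_files: list[str],
--     reverse_dependencies: dict[str, list[str]],
-- ) -> list[str]:
--     queue = deque(changed_files)
--     visited = set(changed_files)
--     while queue:
--         current = queue.popleft()
--         for importer in reverse_dependencies.get(current, []):
--             if importer in visited:
--                 continue
--             visited.add(importer)
--             queue.append(importer)
--     return sorted(visited)
-- ===== SOURCE B (Python) =====
-- def expand_affected_files(changed_files, reverse_dependencies):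
--     visited = set(changed_files)
--
--     def helper(node):
--         for importer in reverse_dependencies.get(node, []):
--             if importer not in visited:
--                 visited.add(importer)
--                 helper(importer)
--
--     for f in changed_files:
--         helper(f)
--     return sorted(visited)
-- ===== Notes on version B (the rewrite author's own statement) =====
-- stated objective: alternative
-- what changed: Replaced the iterative deque-based BFS with a recursive DFS: a nested helper recurses into each newly visited importer, seeded once per changed file, with the shared visited set preventing revisits; traversal order differs but the final sorted set is identical.
import Mathlib
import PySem

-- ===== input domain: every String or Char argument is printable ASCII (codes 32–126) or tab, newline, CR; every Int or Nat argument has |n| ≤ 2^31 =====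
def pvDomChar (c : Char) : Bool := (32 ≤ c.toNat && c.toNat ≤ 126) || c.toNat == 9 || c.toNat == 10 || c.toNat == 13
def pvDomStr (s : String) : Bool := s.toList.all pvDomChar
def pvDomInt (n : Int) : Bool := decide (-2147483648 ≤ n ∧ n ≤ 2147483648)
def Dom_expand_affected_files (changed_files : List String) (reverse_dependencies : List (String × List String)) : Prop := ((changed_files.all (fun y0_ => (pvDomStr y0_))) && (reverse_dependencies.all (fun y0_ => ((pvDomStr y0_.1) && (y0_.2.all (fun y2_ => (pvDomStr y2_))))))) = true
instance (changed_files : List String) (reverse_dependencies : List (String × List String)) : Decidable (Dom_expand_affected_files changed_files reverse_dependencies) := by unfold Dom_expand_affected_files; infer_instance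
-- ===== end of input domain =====

-- B replaces the iterative deque-based BFS by a recursive DFS with a shared visited set (different decomposition, same sorted result).

-- shared helper: reverse_dependencies.get(k, []) (first-match association-list lookup, Python dict semantics)
def pvGet (rev : List (String × List String)) (k : String) : List String :=
  PySem.Dict.getD (PySem.Dict.mk rev) k []

-- ===== PORT A =====
-- the body of A's while-loop's for-loop: state (queue, visited)
def pvStepA (s : List String × PySem.Set String) (imp : String) : List String × PySem.Set String :=
  if PySem.Set.contains s.2 imp then s else (s.1 ++ [imp], PySem.Set.add s.2 imp)

-- A's while-loop; fuel only makes the loop total, it is never exhausted on the actual call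
def pvBfs (rev : List (String × List String)) : Nat → List String → PySem.Set String → PySem.Set String
  | _, [], visited => visited
  | 0, _ :: _, visited => visited
  | n+1, current :: queue, visited =>
      let s := (pvGet rev current).foldl pvStepA (queue, visited)
      pvBfs rev n s.1 s.2

def expand_affected_files (changed_files : List String) (reverse_dependencies : List (String × List String)) : List String :=
  let queue := changed_files
  let visited := PySem.Set.ofList changed_files
  let fuel := changed_files.length + (reverse_dependencies.flatMap Prod.snd).length + 1
  PySem.List.sorted (pvBfs reverse_dependencies fuel queue visited) (fun x => x) false

-- ===== PORT B =====
-- B's recursive helper: iterate the importer list, recursing into each newly visited importer;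
-- fuel bounds only the recursion DEPTH (one unit per newly visited node) and is never exhausted on the actual call
def pvDfs (rev : List (String × List String)) (n : Nat) (visited : PySem.Set String) (imps : List String) : PySem.Set String :=
  match n, imps with
  | _, [] => visited
  | 0, _ :: _ => visited
  | n+1, imp :: rest =>
      if PySem.Set.contains visited imp then pvDfs rev (n+1) visited rest
      else pvDfs rev (n+1) (pvDfs rev n (PySem.Set.add visited imp) (pvGet rev imp)) rest
  termination_by (n, imps.length)

def expand_affected_files_alt (changed_files : List String) (reverse_dependencies : List (String × List String)) : List String :=
  let fuel := (reverse_dependencies.flatMap Prod.snd).length + 1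
  let visited := changed_files.foldl
    (fun v f => pvDfs reverse_dependencies fuel v (pvGet reverse_dependencies f))
    (PySem.Set.ofList changed_files)
  PySem.List.sorted visited (fun x => x) false

-- ===== PRECONDITION & SPEC =====
def Spec_expand_affected_files (changed_files : List String) (reverse_dependencies : List (String × List String)) (out : List String) : Prop := out = expand_affected_files_alt changed_files reverse_dependencies
instance (changed_files : List String) (reverse_dependencies : List (String × List String)) (out : List String) : Decidable (Spec_expand_affected_files changed_files reverse_dependencies out) := by unfold Spec_expand_affected_files; infer_instance

-- ===== CLAIM (what is proved, stated in full; the proofs are below) =====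
def Claim_equal_expand_affected_files : Prop := ∀ (changed_files : List String) (reverse_dependencies : List (String × List String)), Dom_expand_affected_files changed_files reverse_dependencies → Spec_expand_affected_files changed_files reverse_dependencies (expand_affected_files changed_files reverse_dependencies)

-- ===== LEMMAS AND PROOFS =====

-- the reachable files: changed files, plus (transitively) importers of reachable files
inductive pvReach (changed : List String) (rev : List (String × List String)) : String → Prop
  | base {x} : x ∈ changed → pvReach changed rev x
  | step {n x} : pvReach changed rev n → x ∈ pvGet rev n → pvReach changed rev x

-- termination measure: how many potential importers are not yet visited
def pvCompl (rev : List (String × List String)) (v : List String) : Nat :=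
  ((rev.flatMap Prod.snd).toFinset \ v.toFinset).card

theorem pv_contains_false (v : PySem.Set String) (x : String) (h : x ∉ v) :
    PySem.Set.contains v x = false := by
  cases hc : PySem.Set.contains v x
  · rfl
  · exact absurd ((PySem.Set.contains_iff v x).1 hc) h

theorem pv_add_of_not_mem (v : PySem.Set String) (x : String) (h : x ∉ v) :
    PySem.Set.add v x = v ++ [x] := by
  simp only [PySem.Set.add, pv_contains_false v x h, Bool.false_eq_true, if_false]

theorem pvGet_subset (rev : List (String × List String)) (k y : String)
    (h : y ∈ pvGet rev k) : y ∈ rev.flatMap Prod.snd := by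
  induction rev with
  | nil =>
      simp [pvGet, PySem.Dict.getD, PySem.Dict.get?] at h
  | cons p rest ih =>
      obtain ⟨a, l⟩ := p
      rw [pvGet, PySem.Dict.getD, PySem.Dict.get?_mk_cons] at h
      by_cases hak : (a == k) = true
      · rw [if_pos hak, Option.getD_some] at h
        exact List.mem_flatMap.2 ⟨(a, l), List.mem_cons_self, h⟩
      · rw [if_neg hak] at h
        have h' : y ∈ rest.flatMap Prod.snd := ih h
        obtain ⟨p', hp', hy⟩ := List.mem_flatMap.1 h'
        exact List.mem_flatMap.2 ⟨p', List.mem_cons_of_mem _ hp', hy⟩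

theorem pvCompl_mono (rev : List (String × List String)) (v w : List String)
    (h : ∀ a ∈ v, a ∈ w) : pvCompl rev w ≤ pvCompl rev v := by
  apply Finset.card_le_card
  apply Finset.sdiff_subset_sdiff (Finset.Subset.refl _)
  intro a ha
  simp only [List.mem_toFinset] at *
  exact h a ha

theorem pvCompl_add_lt (rev : List (String × List String)) (v : List String) (x : String)
    (hx : x ∈ rev.flatMap Prod.snd) (hnx : x ∉ v) :
    pvCompl rev (PySem.Set.add v x) < pvCompl rev v := by
  unfold pvCompl
  rw [pv_add_of_not_mem v x hnx]
  have hxU : x ∈ (rev.flatMap Prod.snd).toFinset \ v.toFinset := by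
    simp [List.mem_toFinset, hx, hnx]
  have : (v ++ [x]).toFinset = insert x v.toFinset := by
    ext a; simp
  rw [this, Finset.sdiff_insert, Finset.card_erase_of_mem hxU]
  exact Nat.sub_lt (Finset.card_pos.2 ⟨x, hxU⟩) Nat.one_pos

theorem pvCompl_le (rev : List (String × List String)) (v : List String) :
    pvCompl rev v ≤ (rev.flatMap Prod.snd).length := by
  calc pvCompl rev v ≤ (rev.flatMap Prod.snd).toFinset.card :=
        Finset.card_le_card (Finset.sdiff_subset)
    _ ≤ (rev.flatMap Prod.snd).length := List.toFinset_card_le _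

-- the inner for-loop of A: adds exactly the unvisited importers of `l` to both queue and visited
theorem pv_foldA_spec (rev : List (String × List String)) :
    ∀ (l : List String) (q : List String) (v : PySem.Set String),
    v.Nodup → (∀ y ∈ l, y ∈ rev.flatMap Prod.snd) →
    (l.foldl pvStepA (q, v)).2.Nodup ∧
    (∀ x ∈ v, x ∈ (l.foldl pvStepA (q, v)).2) ∧
    (∀ y ∈ l, y ∈ (l.foldl pvStepA (q, v)).2) ∧
    (∃ Δ, (l.foldl pvStepA (q, v)).1 = q ++ Δ ∧
      (∀ x ∈ Δ, x ∈ (l.foldl pvStepA (q, v)).2 ∧ x ∈ l) ∧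
      (∀ x ∈ (l.foldl pvStepA (q, v)).2, x ∈ v ∨ x ∈ Δ)) ∧
    pvCompl rev (l.foldl pvStepA (q, v)).2 + (l.foldl pvStepA (q, v)).1.length ≤
      pvCompl rev v + q.length := by
  intro l
  induction l with
  | nil =>
      intro q v hnd _
      refine ⟨hnd, fun x hx => hx, by simp, ⟨[], by simp⟩, le_refl _⟩
  | cons imp rest ih =>
      intro q v hnd hU
      by_cases hmem : imp ∈ v
      · have hc : PySem.Set.contains v imp = true := (PySem.Set.contains_iff v imp).2 hmem
        have hstep : pvStepA (q, v) imp = (q, v) := by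
          simp only [pvStepA]; rw [if_pos hc]
        rw [List.foldl_cons, hstep]
        obtain ⟨c1, c2, c3, ⟨Δ, hΔ1, hΔ2, hΔ3⟩, c5⟩ :=
          ih q v hnd (fun y hy => hU y (List.mem_cons_of_mem _ hy))
        refine ⟨c1, c2, ?_, ⟨Δ, hΔ1, fun x hx => ⟨(hΔ2 x hx).1, List.mem_cons_of_mem _ (hΔ2 x hx).2⟩, hΔ3⟩, c5⟩
        intro y hy
        rcases List.mem_cons.1 hy with rfl | hy
        · exact c2 y hmem
        · exact c3 y hy
      · have hc : PySem.Set.contains v imp = false := by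
          cases hcc : PySem.Set.contains v imp
          · rfl
          · exact absurd ((PySem.Set.contains_iff v imp).1 hcc) hmem
        have hstep : pvStepA (q, v) imp = (q ++ [imp], PySem.Set.add v imp) := by
          simp only [pvStepA]; rw [hc]; rfl
        rw [List.foldl_cons, hstep]
        obtain ⟨c1, c2, c3, ⟨Δ, hΔ1, hΔ2, hΔ3⟩, c5⟩ :=
          ih (q ++ [imp]) (PySem.Set.add v imp) (PySem.Set.nodup_add v imp hnd)
            (fun y hy => hU y (List.mem_cons_of_mem _ hy))
        have hsubadd : ∀ x ∈ v, x ∈ PySem.Set.add v imp := by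
          intro x hx; exact (PySem.Set.mem_add v imp x).2 (Or.inl hx)
        have himpadd : imp ∈ PySem.Set.add v imp := (PySem.Set.mem_add v imp imp).2 (Or.inr rfl)
        refine ⟨c1, fun x hx => c2 x (hsubadd x hx), ?_, ⟨imp :: Δ, ?_, ?_, ?_⟩, ?_⟩
        · intro y hy
          rcases List.mem_cons.1 hy with rfl | hy
          · exact c2 y himpadd
          · exact c3 y hy
        · rw [hΔ1]; simp
        · intro x hx
          rcases List.mem_cons.1 hx with rfl | hx
          · exact ⟨c2 x himpadd, List.mem_cons_self⟩
          · exact ⟨(hΔ2 x hx).1, List.mem_cons_of_mem _ (hΔ2 x hx).2⟩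
        · intro x hx
          rcases hΔ3 x hx with hx' | hx'
          · rcases (PySem.Set.mem_add v imp x).1 hx' with hx'' | rfl
            · exact Or.inl hx''
            · exact Or.inr List.mem_cons_self
          · exact Or.inr (List.mem_cons_of_mem _ hx')
        · have hlt : pvCompl rev (PySem.Set.add v imp) < pvCompl rev v :=
            pvCompl_add_lt rev v imp (hU imp List.mem_cons_self) hmem
          have := c5
          simp only [List.length_append, List.length_cons, List.length_nil] at this ⊢
          omega

-- the while-loop of A: ends with a closed superset of visited containing only reachable files
theorem pv_bfs_spec (changed : List String) (rev : List (String × List String)) :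
    ∀ (n : Nat) (q : List String) (v : PySem.Set String),
    v.Nodup → (∀ x ∈ q, x ∈ v) → (∀ x ∈ v, pvReach changed rev x) →
    (∀ x ∈ v, x ∈ q ∨ ∀ y ∈ pvGet rev x, y ∈ v) →
    pvCompl rev v + q.length ≤ n →
    (pvBfs rev n q v).Nodup ∧ (∀ x ∈ v, x ∈ pvBfs rev n q v) ∧
    (∀ x ∈ pvBfs rev n q v, pvReach changed rev x) ∧
    (∀ x ∈ pvBfs rev n q v, ∀ y ∈ pvGet rev x, y ∈ pvBfs rev n q v) := by
  intro n
  induction n with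
  | zero =>
      intro q v hnd hq hr hI hf
      match q with
      | [] =>
          refine ⟨hnd, fun x hx => hx, hr, ?_⟩
          intro x hx
          rcases hI x hx with h | h
          · exact absurd h (List.not_mem_nil)
          · exact h
      | c :: q' => simp at hf
  | succ n ih =>
      intro q v hnd hq hr hI hf
      match q with
      | [] =>
          refine ⟨hnd, fun x hx => hx, hr, ?_⟩
          intro x hx
          rcases hI x hx with h | h
          · exact absurd h (List.not_mem_nil)
          · exact h
      | c :: q' =>
          show (pvBfs rev n ((pvGet rev c).foldl pvStepA (q', v)).1 ((pvGet rev c).foldl pvStepA (q', v)).2).Nodup ∧ _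
          obtain ⟨c1, c2, c3, ⟨Δ, hΔ1, hΔ2, hΔ3⟩, c5⟩ :=
            pv_foldA_spec rev (pvGet rev c) q' v hnd (fun y hy => pvGet_subset rev c y hy)
          have hcv : c ∈ v := hq c List.mem_cons_self
          have hcr : pvReach changed rev c := hr c hcv
          have hq' : ∀ x ∈ ((pvGet rev c).foldl pvStepA (q', v)).1,
              x ∈ ((pvGet rev c).foldl pvStepA (q', v)).2 := by
            intro x hx
            rw [hΔ1] at hx
            rcases List.mem_append.1 hx with hx | hx
            · exact c2 x (hq x (List.mem_cons_of_mem _ hx))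
            · exact (hΔ2 x hx).1
          have hr' : ∀ x ∈ ((pvGet rev c).foldl pvStepA (q', v)).2, pvReach changed rev x := by
            intro x hx
            rcases hΔ3 x hx with hx' | hx'
            · exact hr x hx'
            · exact pvReach.step hcr (hΔ2 x hx').2
          have hI' : ∀ x ∈ ((pvGet rev c).foldl pvStepA (q', v)).2,
              x ∈ ((pvGet rev c).foldl pvStepA (q', v)).1 ∨
              ∀ y ∈ pvGet rev x, y ∈ ((pvGet rev c).foldl pvStepA (q', v)).2 := by
            intro x hx
            rcases hΔ3 x hx with hx' | hx'
            · rcases hI x hx' with hxq | hxcl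
              · rcases List.mem_cons.1 hxq with rfl | hxq'
                · exact Or.inr (fun y hy => c3 y hy)
                · refine Or.inl ?_
                  rw [hΔ1]
                  exact List.mem_append.2 (Or.inl hxq')
              · exact Or.inr (fun y hy => c2 y (hxcl y hy))
            · refine Or.inl ?_
              rw [hΔ1]
              exact List.mem_append.2 (Or.inr hx')
          have hf' : pvCompl rev ((pvGet rev c).foldl pvStepA (q', v)).2 +
              ((pvGet rev c).foldl pvStepA (q', v)).1.length ≤ n := by
            have hlen : (c :: q').length = q'.length + 1 := by simp
            omega
          obtain ⟨d1, d2, d3, d4⟩ := ih _ _ c1 hq' hr' hI' hf'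
          exact ⟨d1, fun x hx => d2 x (c2 x hx), d3, d4⟩

theorem pvDfs_nil (rev : List (String × List String)) (n : Nat) (v : PySem.Set String) :
    pvDfs rev n v [] = v := by
  cases n <;> rw [pvDfs]

-- B's recursive helper: returns a relatively-closed superset of visited ∪ imps, all reachable
theorem pv_dfs_spec (changed : List String) (rev : List (String × List String)) :
    ∀ (n : Nat) (v : PySem.Set String) (imps : List String),
    v.Nodup → (∀ x ∈ v, pvReach changed rev x) →
    (∀ y ∈ imps, pvReach changed rev y) → (∀ y ∈ imps, y ∈ rev.flatMap Prod.snd) →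
    pvCompl rev v < n →
    (pvDfs rev n v imps).Nodup ∧ (∀ x ∈ v, x ∈ pvDfs rev n v imps) ∧
    (∀ x ∈ pvDfs rev n v imps, pvReach changed rev x) ∧
    (∀ y ∈ imps, y ∈ pvDfs rev n v imps) ∧
    (∀ x ∈ pvDfs rev n v imps, x ∈ v ∨ ∀ y ∈ pvGet rev x, y ∈ pvDfs rev n v imps) := by
  intro n
  induction n with
  | zero =>
      intro v imps _ _ _ _ hf
      exact absurd hf (by omega)
  | succ n ihn =>
      intro v imps
      induction imps generalizing v with
      | nil =>
          intro hnd hvr _ _ _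
          rw [pvDfs_nil]
          exact ⟨hnd, fun x hx => hx, hvr, by simp, fun x hx => Or.inl hx⟩
      | cons imp rest ihl =>
          intro hnd hvr hir hiU hf
          by_cases hmem : imp ∈ v
          · have hc : PySem.Set.contains v imp = true := (PySem.Set.contains_iff v imp).2 hmem
            have heq : pvDfs rev (n+1) v (imp :: rest) = pvDfs rev (n+1) v rest := by
              rw [pvDfs, if_pos hc]
            rw [heq]
            obtain ⟨c1, c2, c3, c4, c5⟩ := ihl v hnd hvr
              (fun y hy => hir y (List.mem_cons_of_mem _ hy))
              (fun y hy => hiU y (List.mem_cons_of_mem _ hy)) hf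
            refine ⟨c1, c2, c3, ?_, c5⟩
            intro y hy
            rcases List.mem_cons.1 hy with rfl | hy
            · exact c2 y hmem
            · exact c4 y hy
          · have hc : PySem.Set.contains v imp = false := by
              cases hcc : PySem.Set.contains v imp
              · rfl
              · exact absurd ((PySem.Set.contains_iff v imp).1 hcc) hmem
            have heq : pvDfs rev (n+1) v (imp :: rest) =
                pvDfs rev (n+1) (pvDfs rev n (PySem.Set.add v imp) (pvGet rev imp)) rest := by
              rw [pvDfs, hc]; rfl
            rw [heq]
            have himpr : pvReach changed rev imp := hir imp List.mem_cons_self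
            have hcompl1 : pvCompl rev (PySem.Set.add v imp) < n := by
              have h1 : pvCompl rev (PySem.Set.add v imp) < pvCompl rev v :=
                pvCompl_add_lt rev v imp (hiU imp List.mem_cons_self) hmem
              omega
            obtain ⟨e1, e2, e3, e4, e5⟩ := ihn (PySem.Set.add v imp) (pvGet rev imp)
              (PySem.Set.nodup_add v imp hnd)
              (by intro x hx
                  rcases (PySem.Set.mem_add v imp x).1 hx with hx' | rfl
                  · exact hvr x hx'
                  · exact himpr)
              (fun y hy => pvReach.step himpr hy)
              (fun y hy => pvGet_subset rev imp y hy)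
              hcompl1
            have hsub1 : ∀ x ∈ v, x ∈ pvDfs rev n (PySem.Set.add v imp) (pvGet rev imp) := by
              intro x hx
              exact e2 x ((PySem.Set.mem_add v imp x).2 (Or.inl hx))
            have hcompl2 : pvCompl rev (pvDfs rev n (PySem.Set.add v imp) (pvGet rev imp)) < n + 1 := by
              have := pvCompl_mono rev (PySem.Set.add v imp) _ e2
              omega
            obtain ⟨f1, f2, f3, f4, f5⟩ := ihl (pvDfs rev n (PySem.Set.add v imp) (pvGet rev imp))
              e1 e3 (fun y hy => hir y (List.mem_cons_of_mem _ hy))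
              (fun y hy => hiU y (List.mem_cons_of_mem _ hy)) hcompl2
            refine ⟨f1, fun x hx => f2 x (hsub1 x hx), f3, ?_, ?_⟩
            · intro y hy
              rcases List.mem_cons.1 hy with rfl | hy
              · exact f2 y (e2 y ((PySem.Set.mem_add _ _ y).2 (Or.inr rfl)))
              · exact f4 y hy
            · intro x hx
              rcases f5 x hx with hx1 | hx1
              · rcases e5 x hx1 with hx2 | hx2
                · rcases (PySem.Set.mem_add v imp x).1 hx2 with hx3 | rfl
                  · exact Or.inl hx3
                  · exact Or.inr (fun y hy => f2 y (e4 y hy))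
                · exact Or.inr (fun y hy => f2 y (hx2 y hy))
              · exact Or.inr hx1

-- B's outer loop over changed files
theorem pv_foldB_spec (changed : List String) (rev : List (String × List String))
    (fuel : Nat) (hfuel : (rev.flatMap Prod.snd).length < fuel) :
    ∀ (l : List String) (v : PySem.Set String),
    v.Nodup → (∀ x ∈ v, pvReach changed rev x) → (∀ f ∈ l, f ∈ changed) →
    (l.foldl (fun v f => pvDfs rev fuel v (pvGet rev f)) v).Nodup ∧
    (∀ x ∈ v, x ∈ l.foldl (fun v f => pvDfs rev fuel v (pvGet rev f)) v) ∧
    (∀ x ∈ l.foldl (fun v f => pvDfs rev fuel v (pvGet rev f)) v, pvReach changed rev x) ∧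
    (∀ f ∈ l, ∀ y ∈ pvGet rev f, y ∈ l.foldl (fun v f => pvDfs rev fuel v (pvGet rev f)) v) ∧
    (∀ x ∈ l.foldl (fun v f => pvDfs rev fuel v (pvGet rev f)) v,
      x ∈ v ∨ ∀ y ∈ pvGet rev x, y ∈ l.foldl (fun v f => pvDfs rev fuel v (pvGet rev f)) v) := by
  intro l
  induction l with
  | nil =>
      intro v hnd hr _
      exact ⟨hnd, fun x hx => hx, hr, by simp, fun x hx => Or.inl hx⟩
  | cons f l' ih =>
      intro v hnd hr hch
      rw [List.foldl_cons]
      have hfr : pvReach changed rev f := pvReach.base (hch f List.mem_cons_self)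
      obtain ⟨e1, e2, e3, e4, e5⟩ := pv_dfs_spec changed rev fuel v (pvGet rev f) hnd hr
        (fun y hy => pvReach.step hfr hy)
        (fun y hy => pvGet_subset rev f y hy)
        (by have := pvCompl_le rev v; omega)
      obtain ⟨g1, g2, g3, g4, g5⟩ := ih (pvDfs rev fuel v (pvGet rev f)) e1 e3
        (fun x hx => hch x (List.mem_cons_of_mem _ hx))
      refine ⟨g1, fun x hx => g2 x (e2 x hx), g3, ?_, ?_⟩
      · intro f' hf' y hy
        rcases List.mem_cons.1 hf' with rfl | hf''
        · exact g2 y (e4 y hy)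
        · exact g4 f' hf'' y hy
      · intro x hx
        rcases g5 x hx with hx1 | hx1
        · rcases e5 x hx1 with hx2 | hx2
          · exact Or.inl hx2
          · exact Or.inr (fun y hy => g2 y (hx2 y hy))
        · exact Or.inr hx1

theorem pv_mem_ofList (xs : List String) (x : String) :
    x ∈ PySem.Set.ofList xs ↔ x ∈ xs := by
  simp [PySem.Set.mem_ofList]

-- A's final visited set: membership is exactly reachability
theorem pv_resultA_mem (changed : List String) (rev : List (String × List String)) :
    (pvBfs rev (changed.length + (rev.flatMap Prod.snd).length + 1) changed
        (PySem.Set.ofList changed)).Nodup ∧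
    (∀ x, x ∈ pvBfs rev (changed.length + (rev.flatMap Prod.snd).length + 1) changed
        (PySem.Set.ofList changed) ↔ pvReach changed rev x) := by
  obtain ⟨c1, c2, c3, c4⟩ := pv_bfs_spec changed rev
    (changed.length + (rev.flatMap Prod.snd).length + 1) changed (PySem.Set.ofList changed)
    (PySem.Set.nodup_ofList changed)
    (fun x hx => (pv_mem_ofList changed x).2 hx)
    (fun x hx => pvReach.base ((pv_mem_ofList changed x).1 hx))
    (fun x hx => Or.inl ((pv_mem_ofList changed x).1 hx))
    (by have := pvCompl_le rev (PySem.Set.ofList changed); omega)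
  refine ⟨c1, fun x => ⟨c3 x, ?_⟩⟩
  intro hr
  induction hr with
  | base h => exact c2 _ ((pv_mem_ofList changed _).2 h)
  | step _ h ih => exact c4 _ ih _ h

-- B's final visited set: membership is exactly reachability
theorem pv_resultB_mem (changed : List String) (rev : List (String × List String)) :
    (changed.foldl (fun v f => pvDfs rev ((rev.flatMap Prod.snd).length + 1) v (pvGet rev f))
        (PySem.Set.ofList changed)).Nodup ∧
    (∀ x, x ∈ changed.foldl (fun v f => pvDfs rev ((rev.flatMap Prod.snd).length + 1) v (pvGet rev f))
        (PySem.Set.ofList changed) ↔ pvReach changed rev x) := by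
  obtain ⟨g1, g2, g3, g4, g5⟩ := pv_foldB_spec changed rev ((rev.flatMap Prod.snd).length + 1)
    (by omega) changed (PySem.Set.ofList changed)
    (PySem.Set.nodup_ofList changed)
    (fun x hx => pvReach.base ((pv_mem_ofList changed x).1 hx))
    (fun f hf => hf)
  refine ⟨g1, fun x => ⟨g3 x, ?_⟩⟩
  intro hr
  induction hr with
  | base h => exact g2 _ ((pv_mem_ofList changed _).2 h)
  | step hn h ih =>
      rename_i m y
      rcases g5 m ih with hm | hm
      · exact g4 m ((pv_mem_ofList changed m).1 hm) y h
      · exact hm y h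

-- ===== VERDICT (by name: the statement is the Claim_ definition above) =====
theorem expand_affected_files_spec : Claim_equal_expand_affected_files := by
  unfold Claim_equal_expand_affected_files
  intro changed rev _
  unfold Spec_expand_affected_files expand_affected_files expand_affected_files_alt
  obtain ⟨ha1, ha2⟩ := pv_resultA_mem changed rev
  obtain ⟨hb1, hb2⟩ := pv_resultB_mem changed rev
  apply PySem.List.sorted_eq_sorted_of_perm _ _ (fun x => x) (fun _ _ h => h)
  exact (List.perm_ext_iff_of_nodup ha1 hb1).2 (fun a => (ha2 a).trans (hb2 a).symm)
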